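-- pv_equiv track=rewrite | github.com/JYifei/throwing-analysis-tool | src/criteria_eval.py | model_range_to_student_range
-- ===== SOURCE A (Python) =====
-- from typing import Dict, List, Tuple, Optional
--
-- def model_range_to_student_range(
--     ref_to_stu: Dict[int, List[int]],
--     model_a: int,
--     model_b: int,
-- ) -> Optional[Tuple[int, int]]:
--     hit: List[int] = []
--     for r in range(int(model_a), int(model_b) + 1):
--         if r in ref_to_stu:
--             hit.extend(ref_to_stu[r])
--     if not hit:
--         return None
--     return (min(hit), max(hit))
-- ===== SOURCE B (Python) =====
-- def model_range_to_student_range(ref_to_stu, model_a, model_b):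
--     lo = hi = None
--     for k, vs in ref_to_stu.items():
--         if model_a <= k <= model_b:
--             for v in vs:
--                 if lo is None or v < lo:
--                     lo = v
--                 if hi is None or hi < v:
--                     hi = v
--     return None if lo is None else (lo, hi)
-- ===== Notes on version B (the rewrite author's own statement) =====
-- stated objective: alternative
-- what changed: Instead of scanning every integer r of [model_a, model_b] with a dict membership test, collecting all hit values into a list and then min/max-scanning it, B makes a single pass over the dict's items, filters keys into the range, and maintains a running (min, max) pair with no intermediate list.
import Mathlib
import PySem

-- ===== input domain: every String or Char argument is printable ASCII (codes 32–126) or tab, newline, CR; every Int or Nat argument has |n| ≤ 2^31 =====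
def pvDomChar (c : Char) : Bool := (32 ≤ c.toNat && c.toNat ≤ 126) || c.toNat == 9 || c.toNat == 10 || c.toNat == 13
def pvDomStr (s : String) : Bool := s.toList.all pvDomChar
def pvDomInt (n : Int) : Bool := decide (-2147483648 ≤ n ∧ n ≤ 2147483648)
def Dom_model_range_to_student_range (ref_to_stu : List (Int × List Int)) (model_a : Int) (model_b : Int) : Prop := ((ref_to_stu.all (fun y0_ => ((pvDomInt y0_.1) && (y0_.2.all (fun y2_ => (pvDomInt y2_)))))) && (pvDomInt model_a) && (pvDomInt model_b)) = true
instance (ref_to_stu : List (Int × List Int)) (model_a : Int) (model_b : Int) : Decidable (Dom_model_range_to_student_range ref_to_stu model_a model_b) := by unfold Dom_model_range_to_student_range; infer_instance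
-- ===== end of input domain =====

-- B replaces A's scan over every integer of [model_a, model_b] (building a hit list that is
-- then min/max-scanned) by a single pass over the dict items with a running (min, max) pair.

-- ===== PORT A =====
def model_range_to_student_range (ref_to_stu : List (Int × List Int)) (model_a : Int) (model_b : Int) : Option (Int × Int) :=
  let d := PySem.Dict.mk ref_to_stu
  let hit : List Int := (PySem.List.pyRange model_a (model_b + 1) 1).foldl
    (fun acc r => if d.contains r then acc ++ d.getD r [] else acc) []
  if hit.isEmpty then none
  else
    match PySem.List.min? hit (fun y => y), PySem.List.max? hit (fun y => y) with
    | some lo, some hi => some (lo, hi)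
    | _, _ => none

-- ===== PORT B =====
-- B's inner loop body: update the running (min, max) with one value
def pvStep (st : Option (Int × Int)) (v : Int) : Option (Int × Int) :=
  match st with
  | none => some (v, v)
  | some (lo, hi) => some (if v < lo then v else lo, if hi < v then v else hi)

def model_range_to_student_range_alt (ref_to_stu : List (Int × List Int)) (model_a : Int) (model_b : Int) : Option (Int × Int) :=
  ref_to_stu.foldl
    (fun st kv => if model_a ≤ kv.1 ∧ kv.1 ≤ model_b then kv.2.foldl pvStep st else st)
    none

-- ===== PRECONDITION & SPEC =====
-- Pre_ excludes association lists with duplicate keys, which cannot arise from a Python dict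
-- (A's dict lookup sees only the first binding of a duplicated key, while B scans every item).
def Pre_model_range_to_student_range (ref_to_stu : List (Int × List Int)) (model_a : Int) (model_b : Int) : Prop :=
  (ref_to_stu.map Prod.fst).Nodup
instance (ref_to_stu : List (Int × List Int)) (model_a : Int) (model_b : Int) : Decidable (Pre_model_range_to_student_range ref_to_stu model_a model_b) := by unfold Pre_model_range_to_student_range; infer_instance
def pvWitness_model_range_to_student_range : (List (Int × List Int)) × Int × Int := ([(1, [3, 5]), (2, [0])], 0, 2)

def Spec_model_range_to_student_range (ref_to_stu : List (Int × List Int)) (model_a : Int) (model_b : Int) (out : Option (Int × Int)) : Prop := out = model_range_to_student_range_alt ref_to_stu model_a model_b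
instance (ref_to_stu : List (Int × List Int)) (model_a : Int) (model_b : Int) (out : Option (Int × Int)) : Decidable (Spec_model_range_to_student_range ref_to_stu model_a model_b out) := by unfold Spec_model_range_to_student_range; infer_instance

-- ===== CLAIM (what is proved, stated in full; the proofs are below) =====
def Claim_equal_model_range_to_student_range : Prop := ∀ (ref_to_stu : List (Int × List Int)) (model_a : Int) (model_b : Int), Dom_model_range_to_student_range ref_to_stu model_a model_b → Pre_model_range_to_student_range ref_to_stu model_a model_b → Spec_model_range_to_student_range ref_to_stu model_a model_b (model_range_to_student_range ref_to_stu model_a model_b)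

-- ===== LEMMAS AND PROOFS =====

-- B's nested fold = one fold of pvStep over the values of the in-range items
theorem altB_flatten (a b : Int) (d : List (Int × List Int)) (st : Option (Int × Int)) :
    d.foldl (fun st kv => if a ≤ kv.1 ∧ kv.1 ≤ b then kv.2.foldl pvStep st else st) st
      = ((d.filter (fun kv => decide (a ≤ kv.1 ∧ kv.1 ≤ b))).flatMap (fun kv => kv.2)).foldl pvStep st := by
  induction d generalizing st with
  | nil => simp
  | cons kv t ih =>
    by_cases h : a ≤ kv.1 ∧ kv.1 ≤ b <;>
      simp [h, ih, List.foldl_append]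

theorem pvStep_some (lo hi : Int) (xs : List Int) :
    xs.foldl pvStep (some (lo, hi)) = some (xs.foldl min lo, xs.foldl max hi) := by
  induction xs generalizing lo hi with
  | nil => rfl
  | cons v t ih =>
    simp only [List.foldl_cons]
    rw [show pvStep (some (lo, hi)) v = some (min lo v, max hi v) by
      simp [pvStep, min_def, max_def]; constructor <;> (split_ifs <;> omega)]
    exact ih _ _

theorem pvStep_run (x : Int) (t : List Int) :
    (x :: t).foldl pvStep none = some (t.foldl min x, t.foldl max x) := by
  simp only [List.foldl_cons]
  exact pvStep_some x x t

-- membership in A's hit list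
theorem memA (d : List (Int × List Int)) (a b v : Int) :
    (v ∈ (PySem.List.pyRange a (b + 1) 1).foldl
        (fun acc r => if (PySem.Dict.mk d).contains r then acc ++ (PySem.Dict.mk d).getD r [] else acc) [])
      ↔ ∃ r vs, a ≤ r ∧ r ≤ b ∧ (PySem.Dict.mk d).get? r = some vs ∧ v ∈ vs := by
  rw [PySem.List.foldl_congr_mem (PySem.List.pyRange a (b + 1) 1) _
      (fun acc r => acc ++ (if (PySem.Dict.mk d).contains r then (PySem.Dict.mk d).getD r [] else [])) []
      (by intro acc r _; by_cases hc : (PySem.Dict.mk d).contains r = true <;> simp [hc]),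
    PySem.List.foldl_append_eq_flatMap]
  simp only [List.nil_append, List.mem_flatMap, PySem.List.mem_pyRange_one]
  constructor
  · rintro ⟨r, ⟨hr1, hr2⟩, hv⟩
    split_ifs at hv with hc
    · rcases Option.isSome_iff_exists.mp (by rw [← PySem.Dict.contains_eq_isSome_get? (PySem.Dict.mk d) r]; exact hc) with ⟨vs, hvs⟩
      exact ⟨r, vs, hr1, by omega, hvs, by rwa [PySem.Dict.getD_of_get?_eq_some (PySem.Dict.mk d) [] hvs] at hv⟩
    · simp at hv
  · rintro ⟨r, vs, hr1, hr2, hvs, hv⟩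
    refine ⟨r, ⟨hr1, by omega⟩, ?_⟩
    have hc : (PySem.Dict.mk d).contains r = true := by
      rw [PySem.Dict.contains_eq_isSome_get?, hvs]; rfl
    rw [if_pos hc, PySem.Dict.getD_of_get?_eq_some (PySem.Dict.mk d) [] hvs]; exact hv

-- membership in B's flattened value list; needs nodup keys to match A's dict lookup
theorem memB (d : List (Int × List Int)) (hnd : (d.map Prod.fst).Nodup) (a b v : Int) :
    (v ∈ (d.filter (fun kv => decide (a ≤ kv.1 ∧ kv.1 ≤ b))).flatMap (fun kv => kv.2))
      ↔ ∃ r vs, a ≤ r ∧ r ≤ b ∧ (PySem.Dict.mk d).get? r = some vs ∧ v ∈ vs := by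
  simp only [List.mem_flatMap, List.mem_filter, decide_eq_true_eq]
  constructor
  · rintro ⟨⟨k, vs⟩, ⟨hmem, hk1, hk2⟩, hv⟩
    exact ⟨k, vs, hk1, hk2, PySem.Dict.get?_of_mem_items (PySem.Dict.mk d) hmem hnd, hv⟩
  · rintro ⟨r, vs, hr1, hr2, hvs, hv⟩
    exact ⟨(r, vs), ⟨PySem.Dict.mem_items_of_get?_eq_some (PySem.Dict.mk d) hvs, hr1, hr2⟩, hv⟩

-- the running fold computes the minimum / maximum value of the list
theorem foldl_min_spec (x : Int) (t : List Int) :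
    t.foldl min x ∈ x :: t ∧ ∀ y ∈ x :: t, t.foldl min x ≤ y := by
  have h := PySem.List.min?_id_cons (x := x) (t := t)
  exact ⟨PySem.List.min?_mem h, fun y hy => PySem.List.min?_isMin h y hy⟩

theorem foldl_max_spec (x : Int) (t : List Int) :
    t.foldl max x ∈ x :: t ∧ ∀ y ∈ x :: t, y ≤ t.foldl max x := by
  have h := PySem.List.max?_id_cons (x := x) (t := t)
  exact ⟨PySem.List.max?_mem h, fun y hy => PySem.List.max?_isMax h y hy⟩

-- ===== VERDICT (by name: the statement is the Claim_ definition above) =====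
theorem model_range_to_student_range_spec : Claim_equal_model_range_to_student_range := by
  intro d a b _ hpre
  unfold Spec_model_range_to_student_range
  unfold model_range_to_student_range model_range_to_student_range_alt
  rw [altB_flatten]
  dsimp only
  have hmem : ∀ v : Int,
      (v ∈ (PySem.List.pyRange a (b + 1) 1).foldl
          (fun acc r => if (PySem.Dict.mk d).contains r then acc ++ (PySem.Dict.mk d).getD r [] else acc) [])
        ↔ v ∈ (d.filter (fun kv => decide (a ≤ kv.1 ∧ kv.1 ≤ b))).flatMap (fun kv => kv.2) :=
    fun v => (memA d a b v).trans (memB d hpre a b v).symm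
  rcases hF : (PySem.List.pyRange a (b + 1) 1).foldl
      (fun acc r => if (PySem.Dict.mk d).contains r then acc ++ (PySem.Dict.mk d).getD r [] else acc) []
    with _ | ⟨x, tx⟩ <;>
  rcases hG : (d.filter (fun kv => decide (a ≤ kv.1 ∧ kv.1 ≤ b))).flatMap (fun kv => kv.2)
    with _ | ⟨y, ty⟩ <;>
  simp only [hF, hG] at hmem ⊢
  · simp
  · exact absurd ((hmem y).mpr List.mem_cons_self) (by simp)
  · exact absurd ((hmem x).mp List.mem_cons_self) (by simp)
  · rw [pvStep_run, List.isEmpty_cons, PySem.List.min?_id_cons, PySem.List.max?_id_cons]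
    have hminA := foldl_min_spec x tx
    have hminB := foldl_min_spec y ty
    have hmaxA := foldl_max_spec x tx
    have hmaxB := foldl_max_spec y ty
    have hmin : tx.foldl min x = ty.foldl min y :=
      le_antisymm (hminA.2 _ ((hmem _).mpr hminB.1)) (hminB.2 _ ((hmem _).mp hminA.1))
    have hmax : tx.foldl max x = ty.foldl max y :=
      le_antisymm (hmaxB.2 _ ((hmem _).mp hmaxA.1)) (hmaxA.2 _ ((hmem _).mpr hmaxB.1))
    simp [hmin, hmax]
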